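-- pv_equiv track=rewrite | github.com/riaz-khan-16/Problem_Solving_with_Python | 8_Leetcode_Recursion/Basic/15.remove_word_from_string.py | f
-- ===== SOURCE A (Python) =====
-- def f(news,mains):
--
--     if len(mains)==0:
--         return news
--     ch=mains[0:5]
--     if ch=='apple':
--          return news+mains[5:]
--     else:
--         return f(news+ch[0],mains[1:])
-- ===== SOURCE B (Python) =====
-- def f(news, mains):
--     i = mains.find('apple')
--     if i == -1:
--         return news + mains
--     return news + mains[:i] + mains[i+5:]
-- ===== Notes on version B (the rewrite author's own statement) =====
-- stated objective: faster
-- what changed: Replaces the char-by-char tail recursion (which rebuilds the accumulator and slices the remainder at every step) with a single str.find for the first 'apple' followed by one splice of the two slices around it.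
import Mathlib
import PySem

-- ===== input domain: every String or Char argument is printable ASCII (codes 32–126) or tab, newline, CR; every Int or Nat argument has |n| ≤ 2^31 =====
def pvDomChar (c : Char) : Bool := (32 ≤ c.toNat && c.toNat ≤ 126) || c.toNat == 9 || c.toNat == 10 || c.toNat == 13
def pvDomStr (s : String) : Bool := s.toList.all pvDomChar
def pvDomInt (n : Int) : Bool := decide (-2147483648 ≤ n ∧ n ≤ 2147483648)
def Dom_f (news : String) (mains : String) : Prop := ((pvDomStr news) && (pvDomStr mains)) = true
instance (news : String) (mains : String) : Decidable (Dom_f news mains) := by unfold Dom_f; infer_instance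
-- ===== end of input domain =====

-- B replaces A's char-by-char tail recursion by one substring search (find) plus a splice of two
-- slices; objective: faster (A copies the remainder at every recursive step).

-- ===== PORT A =====
-- literal port of A's tail recursion, over the code points
def fAgo (acc : List Char) (m : List Char) : List Char :=
  if m.length = 0 then acc
  else
    let ch := PySem.List.slice m (some 0) (some 5)
    if ch = "apple".toList then acc ++ PySem.List.slice m (some 5) none
    else
      match PySem.List.pyGet? ch 0 with
      | some c => fAgo (acc ++ [c]) (PySem.List.slice m (some 1) none)
      | none => acc   -- unreachable: m is nonempty here, so ch = m[0:5] is nonempty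
termination_by m.length
decreasing_by
  rename_i h _
  simp [PySem.List.slice_from_one, List.length_tail]
  omega

def f (news : String) (mains : String) : String :=
  String.ofList (fAgo news.toList mains.toList)

-- ===== PORT B =====
def f_alt (news : String) (mains : String) : String :=
  let i := PySem.Str.find mains "apple"
  if i = -1 then String.ofList (news.toList ++ mains.toList)
  else String.ofList (news.toList ++ PySem.List.slice mains.toList none (some i)
        ++ PySem.List.slice mains.toList (some (i + 5)) none)

-- ===== PRECONDITION & SPEC =====
def Spec_f (news : String) (mains : String) (out : String) : Prop := out = f_alt news mains
instance (news : String) (mains : String) (out : String) : Decidable (Spec_f news mains out) := by unfold Spec_f; infer_instance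

-- ===== CLAIM (what is proved, stated in full; the proofs are below) =====
def Claim_equal_f : Prop := ∀ (news : String) (mains : String), Dom_f news mains → Spec_f news mains (f news mains)

-- ===== LEMMAS AND PROOFS =====

-- find on a cons cell, when the pattern is not a prefix: shift the search into the tail
lemma find_cons_of_not_prefix (c : Char) (rest sub : List Char) (h : ¬ sub <+: (c :: rest)) :
    PySem.Chars.find (c :: rest) sub =
      (if PySem.Chars.find rest sub = -1 then -1 else PySem.Chars.find rest sub + 1) := by
  have hdrop : ∀ j : Nat, (c :: rest).drop (j + 1) = rest.drop j := by intro j; simp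
  by_cases hr : PySem.Chars.find rest sub = -1
  · rw [if_pos hr]
    rw [PySem.Chars.find_eq_neg_one_iff]
    intro hinf
    obtain ⟨j, hj⟩ := (PySem.Chars.exists_prefix_drop_iff_isIn sub (c :: rest)).mpr
      ((PySem.Chars.isIn_iff_infix sub (c :: rest)).mpr hinf)
    cases j with
    | zero => exact h (by simpa using hj)
    | succ k =>
      rw [hdrop] at hj
      exact (PySem.Chars.find_eq_neg_one_iff rest sub).mp hr
        ((PySem.Chars.isIn_iff_infix sub rest).mp
          ((PySem.Chars.exists_prefix_drop_iff_isIn sub rest).mp ⟨k, hj⟩))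
  · rw [if_neg hr]
    have hi0 : 0 ≤ PySem.Chars.find rest sub := by
      have := PySem.Chars.neg_one_le_find rest sub; omega
    obtain ⟨hip, himin⟩ := PySem.Chars.find_spec hi0
    have ht0 : 0 ≤ PySem.Chars.find (c :: rest) sub := by
      rw [PySem.Chars.find_nonneg_iff]
      refine (PySem.Chars.isIn_iff_infix sub (c :: rest)).mp
        ((PySem.Chars.exists_prefix_drop_iff_isIn sub (c :: rest)).mp
          ⟨(PySem.Chars.find rest sub).toNat + 1, ?_⟩)
      rw [hdrop]; exact hip
    obtain ⟨htp, htmin⟩ := PySem.Chars.find_spec ht0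
    have htne : (PySem.Chars.find (c :: rest) sub).toNat ≠ 0 := by
      intro h0; rw [h0] at htp; exact h (by simpa using htp)
    obtain ⟨k, hk⟩ : ∃ k, (PySem.Chars.find (c :: rest) sub).toNat = k + 1 :=
      ⟨(PySem.Chars.find (c :: rest) sub).toNat - 1, by omega⟩
    rw [hk, hdrop] at htp
    have hk_ge : (PySem.Chars.find rest sub).toNat ≤ k := by
      by_contra hlt
      exact himin k (by omega) htp
    have hle : (PySem.Chars.find (c :: rest) sub).toNat ≤ (PySem.Chars.find rest sub).toNat + 1 := by
      by_contra hlt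
      refine htmin ((PySem.Chars.find rest sub).toNat + 1) (by omega) ?_
      rw [hdrop]; exact hip
    omega

lemma fAgo_eq (m : List Char) :
    ∀ acc, fAgo acc m =
      (if PySem.Chars.find m "apple".toList = -1 then acc ++ m
       else acc ++ m.take (PySem.Chars.find m "apple".toList).toNat
            ++ m.drop ((PySem.Chars.find m "apple".toList).toNat + 5)) := by
  induction m with
  | nil =>
    intro acc
    have hne : PySem.Chars.find ([] : List Char) "apple".toList = -1 := by decide
    simp [fAgo]
  | cons c rest ih =>
    intro acc
    rw [fAgo]
    simp only [List.length_cons, Nat.succ_ne_zero]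
    have hslice05 : PySem.List.slice (c :: rest) (some 0) (some 5) = (c :: rest).take 5 := by
      rw [PySem.List.slice_zero_start, PySem.List.slice_to _ (by norm_num)]; simp
    have hslice5 : PySem.List.slice (c :: rest) (some 5) none = (c :: rest).drop 5 := by
      rw [PySem.List.slice_from _ (by norm_num)]; simp
    by_cases hap : (c :: rest).take 5 = "apple".toList
    · have hpre : "apple".toList <+: (c :: rest) := by
        rw [List.prefix_iff_eq_take]; exact hap.symm
      have h0 : 0 ≤ PySem.Chars.find (c :: rest) "apple".toList := by
        rw [PySem.Chars.find_nonneg_iff]; exact hpre.isInfix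
      obtain ⟨_, hmin⟩ := PySem.Chars.find_spec h0
      have hf0 : PySem.Chars.find (c :: rest) "apple".toList = 0 := by
        by_contra hne
        exact hmin 0 (by omega) (by simpa using hpre)
      rw [hslice05, if_pos hap, hf0]
      simp [hslice5]
    · have hnp : ¬ "apple".toList <+: (c :: rest) := by
        intro hp
        rw [List.prefix_iff_eq_take] at hp
        exact hap (by simpa using hp.symm)
      have hfc := find_cons_of_not_prefix c rest "apple".toList hnp
      rw [hslice05, if_neg hap]
      have hch : PySem.List.pyGet? ((c :: rest).take 5) 0 = some c := by
        rw [List.take_succ_cons]; simp [PySem.List.pyGet?, PySem.List.pyIdx?]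
      rw [hch, PySem.List.slice_from_one, List.tail_cons]
      simp only [if_false]
      rw [ih (acc ++ [c])]
      by_cases hr : PySem.Chars.find rest "apple".toList = -1
      · rw [if_pos hr, hfc, if_pos hr, if_pos rfl]
        simp
      · have hr0 : 0 ≤ PySem.Chars.find rest "apple".toList := by
          have := PySem.Chars.neg_one_le_find rest "apple".toList; omega
        rw [if_neg hr, hfc, if_neg hr,
          if_neg (by omega : ¬ PySem.Chars.find rest "apple".toList + 1 = -1)]
        have htn : (PySem.Chars.find rest "apple".toList + 1).toNat
            = (PySem.Chars.find rest "apple".toList).toNat + 1 := by omega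
        rw [htn, List.take_succ_cons]
        simp [List.drop_succ_cons, List.append_assoc]

-- ===== VERDICT (by name: the statement is the Claim_ definition above) =====
theorem f_spec : Claim_equal_f := by
  intro news mains _
  unfold Spec_f f f_alt
  rw [fAgo_eq]
  have hfe : PySem.Str.find mains "apple" = PySem.Chars.find mains.toList "apple".toList := by
    simp
  simp only [hfe]
  by_cases h : PySem.Chars.find mains.toList "apple".toList = -1
  · rw [if_pos h, if_pos h]
  · have h0 : 0 ≤ PySem.Chars.find mains.toList "apple".toList := by
      have := PySem.Chars.neg_one_le_find mains.toList "apple".toList; omega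
    rw [if_neg h, if_neg h,
      PySem.List.slice_to _ h0, PySem.List.slice_from _ (by omega)]
    have htn : (PySem.Chars.find mains.toList "apple".toList + 5).toNat
        = (PySem.Chars.find mains.toList "apple".toList).toNat + 5 := by omega
    rw [htn, List.append_assoc]
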